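-- pv_equiv track=rewrite | github.com/jessqiao/data-mining-homework | HW4/task2.py | edge_cal
-- ===== SOURCE A (Python) =====
-- def edge_cal(vertax, vertax_info, theta):
--     edge_info = []
--     uid = vertax[0]
--     u_set = set(vertax[1])
--
--     for v in vertax_info:
--         vid = v[0]
--         v_set = set(v[1])
--
--         if uid != vid:
--             if len(u_set & v_set) >= theta:
--                 edge_info.append(vid)
--     return tuple([uid, edge_info])
-- ===== SOURCE B (Python) =====
-- def edge_cal(vertax, vertax_info, theta):
--     uid = vertax[0]
--     # inverted index: item -> list of entry positions whose item set contains it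
--     index = {}
--     for i, v in enumerate(vertax_info):
--         for item in set(v[1]):
--             index.setdefault(item, []).append(i)
--     # overlap count per entry position, accumulated through the index
--     count = {}
--     for item in set(vertax[1]):
--         for i in index.get(item, []):
--             count[i] = count.get(i, 0) + 1
--     edge_info = [v[0] for i, v in enumerate(vertax_info)
--                  if v[0] != uid and count.get(i, 0) >= theta]
--     return (uid, edge_info)
-- ===== Notes on version B (the rewrite author's own statement) =====
-- stated objective: alternative
-- what changed: Replaces A's per-candidate set intersection with an inverted index (item -> entry positions) plus a per-position shared-item counter, then one ordered pass over vertax_info emits vids whose count (default 0) meets theta.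
import Mathlib
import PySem

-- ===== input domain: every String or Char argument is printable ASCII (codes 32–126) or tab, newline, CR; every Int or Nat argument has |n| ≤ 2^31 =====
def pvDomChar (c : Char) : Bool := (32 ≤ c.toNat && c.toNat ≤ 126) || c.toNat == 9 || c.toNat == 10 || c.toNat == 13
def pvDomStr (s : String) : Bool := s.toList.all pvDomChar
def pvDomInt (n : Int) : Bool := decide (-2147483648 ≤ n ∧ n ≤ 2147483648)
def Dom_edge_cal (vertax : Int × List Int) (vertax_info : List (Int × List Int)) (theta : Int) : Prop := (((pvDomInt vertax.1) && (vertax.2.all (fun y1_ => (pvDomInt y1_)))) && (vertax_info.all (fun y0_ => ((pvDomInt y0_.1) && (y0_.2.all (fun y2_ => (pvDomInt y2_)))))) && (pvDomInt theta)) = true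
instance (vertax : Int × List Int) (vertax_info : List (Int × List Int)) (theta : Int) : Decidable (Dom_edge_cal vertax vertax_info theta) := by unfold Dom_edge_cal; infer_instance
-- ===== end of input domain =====

-- B replaces the per-candidate set intersection with an inverted index (item → entry positions)
-- and a shared-item counter per position; objective: alternative data structure, same result.

-- ===== PORT A =====
def edge_cal (vertax : Int × List Int) (vertax_info : List (Int × List Int)) (theta : Int) : Int × List Int :=
  let uid := vertax.1
  let u_set := PySem.Set.ofList vertax.2
  let edge_info := vertax_info.foldl (fun edge_info v =>
    let vid := v.1
    let v_set := PySem.Set.ofList v.2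
    if uid ≠ vid then
      if PySem.Set.len (PySem.Set.inter u_set v_set) ≥ theta then edge_info ++ [vid]
      else edge_info
    else edge_info) []
  (uid, edge_info)

-- ===== PORT B =====
def edge_cal_alt (vertax : Int × List Int) (vertax_info : List (Int × List Int)) (theta : Int) : Int × List Int :=
  let uid := vertax.1
  let index : PySem.Dict Int (List Int) :=
    (PySem.List.enumerate vertax_info).foldl (fun d iv =>
      (PySem.Set.ofList iv.2.2).foldl (fun d item => d.modify item [] (fun l => l ++ [iv.1])) d)
      PySem.Dict.empty
  let count : PySem.Dict Int Int :=
    (PySem.Set.ofList vertax.2).foldl (fun c item =>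
      (index.getD item []).foldl (fun c i => c.modify i 0 (fun n => n + 1)) c)
      PySem.Dict.empty
  let edge_info := (PySem.List.enumerate vertax_info).foldl (fun acc iv =>
    if iv.2.1 ≠ uid ∧ count.getD iv.1 0 ≥ theta then acc ++ [iv.2.1] else acc) []
  (uid, edge_info)

-- ===== PRECONDITION & SPEC =====
def Spec_edge_cal (vertax : Int × List Int) (vertax_info : List (Int × List Int)) (theta : Int) (out : Int × List Int) : Prop := out = edge_cal_alt vertax vertax_info theta
instance (vertax : Int × List Int) (vertax_info : List (Int × List Int)) (theta : Int) (out : Int × List Int) : Decidable (Spec_edge_cal vertax vertax_info theta out) := by unfold Spec_edge_cal; infer_instance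

-- ===== CLAIM (what is proved, stated in full; the proofs are below) =====
def Claim_equal_edge_cal : Prop := ∀ (vertax : Int × List Int) (vertax_info : List (Int × List Int)) (theta : Int), Dom_edge_cal vertax vertax_info theta → Spec_edge_cal vertax vertax_info theta (edge_cal vertax vertax_info theta)

-- ===== LEMMAS AND PROOFS =====

-- the (item, position) pairs fed to B's inverted index, flattened
def pvPairs (xs : List (Int × List Int)) (s : Int) : List (Int × Int) :=
  (PySem.List.enumerate xs s).flatMap (fun iv => (PySem.Set.ofList iv.2.2).map (fun a => (a, iv.1)))

-- the contribution of one entry to the per-item position list, counted at position j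
theorem pvHead (v : List Int) (s a j : Int) :
    (((((PySem.Set.ofList v).map (fun a' => (a', s))).filter (fun p => p.1 == a)).map (fun p => p.2)).count j)
      = if s == j && decide (a ∈ PySem.Set.ofList v) then 1 else 0 := by
  rw [List.count_eq_countP, List.countP_map, List.countP_filter, List.countP_map]
  have key : List.countP ((fun a_1 => ((fun x => x == j) ∘ fun p : Int × Int => p.2) a_1 && a_1.1 == a) ∘ fun a' : Int => (a', s)) (PySem.Set.ofList v)
      = List.countP (fun a' : Int => (s == j) && (a' == a)) (PySem.Set.ofList v) := by
    apply List.countP_congr; intro a' _; simp [Function.comp]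
  rw [key]
  by_cases hs : s = j
  · subst hs
    simp only [beq_self_eq_true, Bool.true_and]
    by_cases ha : a ∈ PySem.Set.ofList v
    · rw [← List.count_eq_countP, List.count_eq_one_of_mem (PySem.Set.nodup_ofList v) ha]
      simp [ha]
    · rw [← List.count_eq_countP, List.count_eq_zero.2 ha]
      simp [ha]
  · have hsj : (s == j) = false := by simp [hs]
    simp [hsj]

-- index position lists, counted at j, as a countP over the enumerated entries
theorem pvIdxCount (xs : List (Int × List Int)) (s a j : Int) :
    ((((pvPairs xs s).filter (fun p => p.1 == a)).map (fun p => p.2)).count j)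
      = (PySem.List.enumerate xs s).countP (fun iv => iv.1 == j && decide (a ∈ PySem.Set.ofList iv.2.2)) := by
  induction xs generalizing s with
  | nil => simp [pvPairs, PySem.List.enumerate]
  | cons v xs ih =>
    simp only [pvPairs, PySem.List.enumerate_cons, List.flatMap_cons, List.filter_append,
      List.map_append, List.count_append, List.countP_cons]
    rw [pvHead]
    rw [show ((PySem.List.enumerate xs (s+1)).flatMap
        (fun iv => (PySem.Set.ofList iv.2.2).map (fun a => (a, iv.1)))) = pvPairs xs (s+1) from rfl, ih]
    simp only [PySem.Set.mem_ofList, beq_iff_eq, Bool.and_eq_true, decide_eq_true_eq]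
    split_ifs <;> omega

-- in a list with strictly increasing firsts, countP of a predicate pinned to first j is decided by the unique entry (j, v)
theorem pvCountP_first {γ : Type} (Q : γ → Bool) (j : Int) (v : γ) :
    ∀ (l : List (Int × γ)), l.Pairwise (fun p q => p.1 < q.1) → (j, v) ∈ l →
      l.countP (fun iv => iv.1 == j && Q iv.2) = if Q v then 1 else 0 := by
  intro l
  induction l with
  | nil => intro _ h; simp at h
  | cons x l ih =>
    intro hpw hm
    rw [List.countP_cons]
    rcases List.mem_cons.1 hm with h | h
    · subst h
      have hz : l.countP (fun iv => iv.1 == j && Q iv.2) = 0 := by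
        rw [List.countP_eq_zero]
        intro p hp
        have hlt := (List.pairwise_cons.1 hpw).1 p hp
        simp only [Bool.and_eq_true, beq_iff_eq]
        rintro ⟨h1, -⟩
        omega
      rw [hz]
      simp
    · have hlt := (List.pairwise_cons.1 hpw).1 (j, v) h
      rw [ih (List.pairwise_cons.1 hpw).2 h]
      have hx : (x.1 == j && Q x.2) = false := by
        have : x.1 ≠ j := by omega
        simp [this]
      rw [hx]
      simp

-- sum of 0/1 indicators = length of the filter
theorem pvSumIndicator (l : List Int) (p : Int → Bool) :
    (l.map (fun a => if p a then 1 else 0)).sum = (l.filter p).length := by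
  induction l with
  | nil => simp
  | cons x l ih => by_cases h : p x <;> simp [h, ih, Nat.add_comm]

-- B's counter at position j equals the size of A's intersection for the entry at j
theorem pvCount_getD (u : List Int) (xs : List (Int × List Int)) (j : Int) (v : Int × List Int)
    (hm : (j, v) ∈ PySem.List.enumerate xs 0) :
    (((PySem.Set.ofList u).foldl (fun c item =>
        ((((PySem.List.enumerate xs).foldl (fun d iv =>
            (PySem.Set.ofList iv.2.2).foldl (fun d item => d.modify item [] (fun l => l ++ [iv.1])) d)
            PySem.Dict.empty).getD item []).foldl (fun c i => c.modify i 0 (fun n => n + 1)) c))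
        PySem.Dict.empty).getD j 0)
      = PySem.Set.len (PySem.Set.inter (PySem.Set.ofList u) (PySem.Set.ofList v.2)) := by
  have hidx : ∀ a : Int,
      ((PySem.List.enumerate xs).foldl (fun d iv =>
          (PySem.Set.ofList iv.2.2).foldl (fun d item => d.modify item [] (fun l => l ++ [iv.1])) d)
          PySem.Dict.empty).getD a []
        = ((pvPairs xs 0).filter (fun p => p.1 == a)).map (fun p => p.2) := by
    intro a
    have hflat : (PySem.List.enumerate xs).foldl (fun d iv =>
          (PySem.Set.ofList iv.2.2).foldl (fun d item => d.modify item [] (fun l => l ++ [iv.1])) d)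
          PySem.Dict.empty
        = (pvPairs xs 0).foldl (fun d p => d.modify p.1 [] (fun l => l ++ [p.2])) PySem.Dict.empty := by
      simp [pvPairs, List.foldl_flatMap, List.foldl_map]
    rw [hflat, PySem.Dict.getD_foldl_modify_append, PySem.Dict.getD_empty, List.nil_append]
  rw [← List.foldl_flatMap, PySem.Dict.getD_foldl_modify_add_one, PySem.Dict.getD_empty, zero_add]
  have hcnt : List.count j ((PySem.Set.ofList u).flatMap (fun item =>
      ((PySem.List.enumerate xs).foldl (fun d iv =>
          (PySem.Set.ofList iv.2.2).foldl (fun d item => d.modify item [] (fun l => l ++ [iv.1])) d)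
          PySem.Dict.empty).getD item []))
      = ((PySem.Set.ofList u).filter (fun a => decide (a ∈ PySem.Set.ofList v.2))).length := by
    rw [List.count_eq_countP, List.countP_flatMap]
    have hmap : (PySem.Set.ofList u).map ((List.countP fun x => x == j) ∘ fun item =>
        ((PySem.List.enumerate xs).foldl (fun d iv =>
            (PySem.Set.ofList iv.2.2).foldl (fun d item => d.modify item [] (fun l => l ++ [iv.1])) d)
            PySem.Dict.empty).getD item [])
        = (PySem.Set.ofList u).map (fun a => if decide (a ∈ PySem.Set.ofList v.2) then 1 else 0) := by
      apply List.map_congr_left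
      intro a _
      simp only [Function.comp]
      rw [hidx a, ← List.count_eq_countP, pvIdxCount,
        pvCountP_first (fun w : Int × List Int => decide (a ∈ PySem.Set.ofList w.2)) j v
          (PySem.List.enumerate xs 0) (PySem.List.pairwise_lt_enumerate xs 0) hm]
    rw [hmap, pvSumIndicator]
  rw [hcnt]
  simp [PySem.Set.len, PySem.Set.inter, List.contains_eq_mem]

-- fold A over the entries and fold B over the enumerated entries produce the same list,
-- given that B's counter agrees with A's intersection size entrywise
theorem pvFinal (uid theta : Int) (cnt : Int → Int) (ilen : Int × List Int → Int) :
    ∀ (xs : List (Int × List Int)) (s : Int) (acc : List Int),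
      (∀ j v, (j, v) ∈ PySem.List.enumerate xs s → cnt j = ilen v) →
      xs.foldl (fun edge_info v =>
          if uid ≠ v.1 then
            if ilen v ≥ theta then edge_info ++ [v.1] else edge_info
          else edge_info) acc
        = (PySem.List.enumerate xs s).foldl (fun acc iv =>
            if iv.2.1 ≠ uid ∧ cnt iv.1 ≥ theta then acc ++ [iv.2.1] else acc) acc := by
  intro xs
  induction xs with
  | nil => intro s acc _; simp [PySem.List.enumerate]
  | cons v xs ih =>
    intro s acc h
    rw [PySem.List.enumerate_cons]
    simp only [List.foldl_cons]
    have hv : cnt s = ilen v := h s v (by rw [PySem.List.enumerate_cons]; exact List.mem_cons_self)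
    have hrest : ∀ j w, (j, w) ∈ PySem.List.enumerate xs (s + 1) → cnt j = ilen w := by
      intro j w hm
      exact h j w (by rw [PySem.List.enumerate_cons]; exact List.mem_cons_of_mem _ hm)
    rw [ih (s + 1) _ hrest]
    congr 1
    by_cases h1 : uid = v.1 <;> by_cases h2 : ilen v ≥ theta <;>
      simp [h1, h2, hv, Ne, eq_comm]

-- ===== VERDICT (by name: the statement is the Claim_ definition above) =====
theorem edge_cal_spec : Claim_equal_edge_cal := by
  intro vertax vertax_info theta _
  unfold Spec_edge_cal edge_cal edge_cal_alt
  simp only []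
  congr 1
  exact pvFinal vertax.1 theta
    (fun j => (((PySem.Set.ofList vertax.2).foldl (fun c item =>
        ((((PySem.List.enumerate vertax_info).foldl (fun d iv =>
            (PySem.Set.ofList iv.2.2).foldl (fun d item => d.modify item [] (fun l => l ++ [iv.1])) d)
            PySem.Dict.empty).getD item []).foldl (fun c i => c.modify i 0 (fun n => n + 1)) c))
        PySem.Dict.empty).getD j 0))
    (fun v => PySem.Set.len (PySem.Set.inter (PySem.Set.ofList vertax.2) (PySem.Set.ofList v.2)))
    vertax_info 0 []
    (fun j v hm => pvCount_getD vertax.2 vertax_info j v hm)
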